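-- pv_equiv track=rewrite | github.com/gabriel-p-artcls/23-08_UCC | 1_code/2_UCC_id_assign.py | preferred_names
-- ===== SOURCE A (Python) =====
-- def preferred_names(names_temp):
--     """
--     Use naming conventions according to this list of preferred names
--     """
--     names_lst = (
--         'blanco', 'ngc', 'melotte', 'trumpler', 'ruprecht', 'berkeley',
--         'pismis', 'vdbh', 'loden', 'kronberger', 'collinder', 'harvard',
--         'eso', 'ascc')
--
--     fname = names_temp[0]
--     if len(names_temp) > 1:
--         for id_prefer in names_lst:
--             for name in names_temp:
--                 if id_prefer in name:
--                     fname = name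
--                     return fname
--     return fname
-- ===== SOURCE B (Python) =====
-- def preferred_names(names_temp):
--     """
--     Use naming conventions according to this list of preferred names
--     """
--     names_lst = (
--         'blanco', 'ngc', 'melotte', 'trumpler', 'ruprecht', 'berkeley',
--         'pismis', 'vdbh', 'loden', 'kronberger', 'collinder', 'harvard',
--         'eso', 'ascc')
--
--     def priority(name):
--         for i, id_prefer in enumerate(names_lst):
--             if id_prefer in name:
--                 return i
--         return len(names_lst)
--
--     best = names_temp[0]
--     for name in names_temp[1:]:
--         if priority(name) < priority(best):
--             best = name
--     return best
-- ===== Notes on version B (the rewrite author's own statement) =====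
-- stated objective: alternative
-- what changed: Replaces A's nested scan (outer loop over the 14 priority substrings, inner scan of all names, early return) by a single argmin pass over the names, each name scored once by a priority(name) helper; the strict-< update reproduces A's priority-then-position tie-break and the len(names_lst) sentinel its first-name fallback.
import Mathlib
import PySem

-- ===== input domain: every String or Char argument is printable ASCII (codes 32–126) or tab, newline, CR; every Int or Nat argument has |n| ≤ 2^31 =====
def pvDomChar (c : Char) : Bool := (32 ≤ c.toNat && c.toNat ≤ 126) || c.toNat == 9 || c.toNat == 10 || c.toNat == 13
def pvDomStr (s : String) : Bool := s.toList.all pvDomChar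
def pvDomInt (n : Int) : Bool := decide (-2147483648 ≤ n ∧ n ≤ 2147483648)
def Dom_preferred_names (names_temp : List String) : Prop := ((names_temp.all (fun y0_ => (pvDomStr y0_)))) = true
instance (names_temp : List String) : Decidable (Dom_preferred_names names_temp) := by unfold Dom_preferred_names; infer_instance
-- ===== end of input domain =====

-- B replaces A's nested priority-first scan by a single argmin pass with a per-name
-- priority key (objective: alternative decomposition, same cost class).

-- ===== PORT A =====
def pvNamesLst : List String :=
  ["blanco", "ngc", "melotte", "trumpler", "ruprecht", "berkeley",
   "pismis", "vdbh", "loden", "kronberger", "collinder", "harvard",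
   "eso", "ascc"]

-- 'for id_prefer in names_lst: for name in names_temp: if id_prefer in name: return name'
def pvLoopA (names_temp : List String) : List String → Option String
  | [] => none
  | p :: ps =>
    match names_temp.find? (fun name => PySem.Str.isIn p name) with
    | some name => some name
    | none => pvLoopA names_temp ps

def preferred_names (names_temp : List String) : String :=
  let fname := (PySem.List.pyGet? names_temp 0).getD ""   -- names_temp[0]; none (IndexError) excluded by Pre_
  if 1 < names_temp.length then
    match pvLoopA names_temp pvNamesLst with
    | some name => name
    | none => fname
  else fname

-- ===== PORT B =====
-- priority(name): index of the first substring of names_lst contained in name, else len(names_lst);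
-- ported structurally (each miss adds 1), which yields the same absolute index / sentinel.
def pvPriorityAux (name : String) : List String → Nat
  | [] => 0
  | p :: ps => if PySem.Str.isIn p name then 0 else pvPriorityAux name ps + 1

def pvPriority (name : String) : Nat := pvPriorityAux name pvNamesLst

def preferred_names_alt (names_temp : List String) : String :=
  let best := (PySem.List.pyGet? names_temp 0).getD ""   -- names_temp[0]; none (IndexError) excluded by Pre_
  (PySem.List.slice names_temp (some 1) none).foldl
    (fun best name => if pvPriority name < pvPriority best then name else best) best

-- ===== PRECONDITION & SPEC =====
-- A raises IndexError on the empty list (names_temp[0]); both programs are defined on every nonempty input.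
def Pre_preferred_names (names_temp : List String) : Prop := names_temp ≠ []
instance (names_temp : List String) : Decidable (Pre_preferred_names names_temp) := by
  unfold Pre_preferred_names; infer_instance
def pvWitness_preferred_names : List String := ["ngc 2516", "Collinder 21"]

def Spec_preferred_names (names_temp : List String) (out : String) : Prop := out = preferred_names_alt names_temp
instance (names_temp : List String) (out : String) : Decidable (Spec_preferred_names names_temp out) := by unfold Spec_preferred_names; infer_instance

-- ===== CLAIM (what is proved, stated in full; the proofs are below) =====
def Claim_equal_preferred_names : Prop := ∀ (names_temp : List String), Dom_preferred_names names_temp → Pre_preferred_names names_temp → Spec_preferred_names names_temp (preferred_names names_temp)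

-- ===== LEMMAS AND PROOFS =====

-- If the seed's key is 0 (minimal for Nat), the strict-< argmin fold never moves off it.
theorem pvFold_of_zero (g : String → Nat) (r : List String) (x : String) (hx : g x = 0) :
    r.foldl (fun b n => if g n < g b then n else b) x = x := by
  induction r generalizing x with
  | nil => rfl
  | cons y r ih =>
    have hstep : (if g y < g x then y else x) = x := by rw [hx]; simp
    rw [List.foldl_cons, hstep]
    exact ih x hx

-- The argmin fold returns the first element with key 0, if one exists.
theorem pvFold_find_zero (g : String → Nat) (r : List String) (x n : String)
    (h : (x :: r).find? (fun m => g m == 0) = some n) :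
    r.foldl (fun b n => if g n < g b then n else b) x = n := by
  induction r generalizing x with
  | nil =>
    by_cases hx : g x = 0
    · rw [List.find?_cons_of_pos (by simp [hx])] at h
      simpa using h
    · rw [List.find?_cons_of_neg (by simp [hx])] at h
      simp at h
  | cons y r ih =>
    by_cases hx : g x = 0
    · rw [List.find?_cons_of_pos (by simp [hx])] at h
      have hn : x = n := by simpa using h
      subst hn
      have hstep : (if g y < g x then y else x) = x := by rw [hx]; simp
      rw [List.foldl_cons, hstep]
      exact pvFold_of_zero g r x hx
    · rw [List.find?_cons_of_neg (by simp [hx])] at h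
      rw [List.foldl_cons]
      by_cases hy : g y = 0
      · have hyx : g y < g x := by rw [hy]; exact Nat.pos_of_ne_zero hx
        rw [if_pos hyx]
        exact ih y h
      · rw [List.find?_cons_of_neg (by simp [hy])] at h
        by_cases hc : g y < g x
        · rw [if_pos hc]
          exact ih y (by rw [List.find?_cons_of_neg (by simp [hy])]; exact h)
        · rw [if_neg hc]
          exact ih x (by rw [List.find?_cons_of_neg (by simp [hx])]; exact h)

-- The argmin fold only compares keys, so any order-preserving change of key leaves it unchanged.
theorem pvFold_congr (g h : String → Nat) (r : List String) (x : String)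
    (hiff : ∀ a ∈ x :: r, ∀ b ∈ x :: r, (g a < g b ↔ h a < h b)) :
    r.foldl (fun b n => if g n < g b then n else b) x
      = r.foldl (fun b n => if h n < h b then n else b) x := by
  induction r generalizing x with
  | nil => rfl
  | cons y r ih =>
    have hxy : g y < g x ↔ h y < h x := hiff y (by simp) x (by simp)
    simp only [List.foldl_cons]
    by_cases hc : g y < g x
    · rw [if_pos hc, if_pos (hxy.mp hc)]
      exact ih y (fun a ha b hb => hiff a (by simp at ha ⊢; tauto) b (by simp at hb ⊢; tauto))
    · rw [if_neg hc, if_neg (fun hh => hc (hxy.mpr hh))]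
      exact ih x (fun a ha b hb => hiff a (by simp at ha ⊢; tauto) b (by simp at hb ⊢; tauto))

-- Main invariant: B's fold computes exactly what A's nested scan returns (fallback = seed).
theorem pvMain (ps : List String) (x : String) (r : List String) :
    r.foldl (fun b n => if pvPriorityAux n ps < pvPriorityAux b ps then n else b) x
      = (match pvLoopA (x :: r) ps with | some n => n | none => x) := by
  induction ps generalizing x r with
  | nil =>
    simp only [pvLoopA]
    exact pvFold_of_zero (fun n => pvPriorityAux n []) r x rfl
  | cons p ps ih =>
    cases hf : (x :: r).find? (fun name => PySem.Str.isIn p name) with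
    | some n =>
      have hl : pvLoopA (x :: r) (p :: ps) = some n := by
        simp only [pvLoopA]; rw [hf]
      rw [hl]
      have hfun : (fun m => pvPriorityAux m (p :: ps) == 0) = (fun m => PySem.Str.isIn p m) := by
        funext m
        cases hm : PySem.Str.isIn p m
        · simp only [pvPriorityAux, hm]; simp
        · simp only [pvPriorityAux, hm]; simp
      have hf' : (x :: r).find? (fun m => pvPriorityAux m (p :: ps) == 0) = some n := by
        rw [hfun]; exact hf
      exact pvFold_find_zero (fun m => pvPriorityAux m (p :: ps)) r x n hf'
    | none =>
      have hl : pvLoopA (x :: r) (p :: ps) = pvLoopA (x :: r) ps := by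
        simp only [pvLoopA]; rw [hf]
      rw [hl, ← ih x r]
      have hno : ∀ m ∈ x :: r, ¬ PySem.Str.isIn p m = true :=
        fun m hm => by simpa using List.find?_eq_none.mp hf m hm
      apply pvFold_congr
      intro a ha b hb
      have ha' : pvPriorityAux a (p :: ps) = pvPriorityAux a ps + 1 := by
        simp only [pvPriorityAux]
        rw [if_neg (hno a ha)]
      have hb' : pvPriorityAux b (p :: ps) = pvPriorityAux b ps + 1 := by
        simp only [pvPriorityAux]
        rw [if_neg (hno b hb)]
      show pvPriorityAux a (p :: ps) < pvPriorityAux b (p :: ps)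
        ↔ pvPriorityAux a ps < pvPriorityAux b ps
      rw [ha', hb']
      omega

-- ===== VERDICT (by name: the statement is the Claim_ definition above) =====
theorem preferred_names_spec : Claim_equal_preferred_names := by
  intro names_temp _ hpre
  unfold Spec_preferred_names
  match names_temp with
  | [] => exact absurd rfl hpre
  | x :: r =>
    unfold preferred_names preferred_names_alt
    have hget : (PySem.List.pyGet? (x :: r) 0).getD "" = x := by
      simp [PySem.List.pyGet?, PySem.List.pyIdx?]
    have hslice : PySem.List.slice (x :: r) (some 1) none = r := by
      rw [PySem.List.slice_from_one]; rfl
    rw [hget, hslice]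
    cases r with
    | nil => simp
    | cons y r' =>
      have hlen : 1 < (x :: y :: r').length := by simp
      rw [if_pos hlen]
      simp only [pvPriority]
      exact (pvMain pvNamesLst x (y :: r')).symm
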